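-- pv_equiv track=rewrite | github.com/RainingStuff/sirsi-library | main.py | remove_duplicate_headers
-- ===== SOURCE A (Python) =====
-- def remove_duplicate_headers(text: str) -> str:
--     # Normalize line endings
--     text = text.replace("\r\n", "\n").replace("\r", "\n")
--
--     # Split into lines
--     lines = text.split("\n")
--
--     result = []
--     seen_header = False
--
--     i = 0
--     while i < len(lines):
--         line = lines[i]
--
--         if "HOLD PICKUP LIST" in line:
--             if not seen_header:
--                 result.extend(lines[i:i+6])
--                 seen_header = True
--             i += 6
--             continue
--
--         i += 1
--         result.append(line)
--
--     return "\n".join(result)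
-- ===== SOURCE B (Python) =====
-- def remove_duplicate_headers(text: str) -> str:
--     # Normalize line endings
--     text = text.replace("\r\n", "\n").replace("\r", "\n")
--     lines = text.split("\n")
--
--     # Phase 1: record the indices of every duplicate header block (jump-by-6 scan).
--     drop = set()
--     seen = False
--     i = 0
--     while i < len(lines):
--         if "HOLD PICKUP LIST" in lines[i]:
--             if seen:
--                 drop.update(range(i, min(i + 6, len(lines))))
--             seen = True
--             i += 6
--         else:
--             i += 1
--
--     # Phase 2: rebuild the text without the dropped lines.
--     return "\n".join(line for idx, line in enumerate(lines) if idx not in drop)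
-- ===== Notes on version B (the rewrite author's own statement) =====
-- stated objective: alternative
-- what changed: A's single stateful pass that conditionally extends a result list is replaced by a detect-then-filter decomposition: one scan records the line indices of duplicate header blocks in a set, then the output is rebuilt by filtering enumerate(lines) against that set.
import Mathlib
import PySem

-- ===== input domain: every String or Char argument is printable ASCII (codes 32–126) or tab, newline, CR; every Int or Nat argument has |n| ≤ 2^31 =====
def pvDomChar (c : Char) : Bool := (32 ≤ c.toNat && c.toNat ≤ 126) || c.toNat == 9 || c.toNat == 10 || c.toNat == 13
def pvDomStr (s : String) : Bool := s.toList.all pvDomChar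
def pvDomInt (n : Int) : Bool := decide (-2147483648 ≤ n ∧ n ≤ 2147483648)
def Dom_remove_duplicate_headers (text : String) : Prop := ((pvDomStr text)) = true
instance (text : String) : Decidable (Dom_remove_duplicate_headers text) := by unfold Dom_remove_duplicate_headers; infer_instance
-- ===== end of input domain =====

-- B replaces A's single stateful result-building pass by a detect-then-filter decomposition
-- (record duplicate-header line indices in a set, then filter enumerate(lines)); objective: alternative.

-- ===== PORT A =====
-- normalize line endings and split, shared preprocessing of both Pythons
def rdhLines (text : String) : List String :=
  (PySem.Str.split? (PySem.Str.replace (PySem.Str.replace text "\r\n" "\n") "\r" "\n") "\n").getD []  -- split? is some: sep "\n" ≠ ""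

-- A's while loop over index i, as structural recursion on the suffix lines[i:]
-- (lines[i:i+6] is the suffix's take 6; i += 6 moves to the suffix's drop 6)
def rdhGoA (lines : List String) (seen : Bool) : List String :=
  match lines with
  | [] => []
  | l :: rest =>
    if PySem.Str.isIn "HOLD PICKUP LIST" l then
      if seen then rdhGoA (rest.drop 5) seen
      else (l :: rest.take 5) ++ rdhGoA (rest.drop 5) true
    else l :: rdhGoA rest seen
termination_by lines.length
decreasing_by
  · simp only [List.length_drop, List.length_cons]; omega
  · simp only [List.length_drop, List.length_cons]; omega
  · simp

def remove_duplicate_headers (text : String) : String :=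
  PySem.Str.join "\n" (rdhGoA (rdhLines text) false)

-- ===== PORT B =====
-- phase 1 of Source B: the while loop collecting duplicate-header indices into the set `drop`;
-- n is len(lines) (fixed), i the loop index, the recursion runs on the suffix lines[i:]
def rdhGoB (rest : List String) (n i : Int) (seen : Bool) (drop : PySem.Set Int) : PySem.Set Int :=
  match rest with
  | [] => drop
  | l :: rs =>
    if PySem.Str.isIn "HOLD PICKUP LIST" l then
      rdhGoB (rs.drop 5) n (i + 6) true
        (if seen then PySem.Set.update drop (PySem.List.pyRange i (min (i + 6) n) 1) else drop)
    else rdhGoB rs n (i + 1) seen drop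
termination_by rest.length
decreasing_by
  · simp only [List.length_drop, List.length_cons]; omega
  · simp

def remove_duplicate_headers_alt (text : String) : String :=
  let lines := rdhLines text
  let drop := rdhGoB lines (lines.length : Int) 0 false PySem.Set.empty
  PySem.Str.join "\n"
    (((PySem.List.enumerate lines 0).filter (fun p => !(PySem.Set.contains drop p.1))).map (·.2))

-- ===== PRECONDITION & SPEC =====
def Spec_remove_duplicate_headers (text : String) (out : String) : Prop := out = remove_duplicate_headers_alt text
instance (text : String) (out : String) : Decidable (Spec_remove_duplicate_headers text out) := by unfold Spec_remove_duplicate_headers; infer_instance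

-- ===== CLAIM (what is proved, stated in full; the proofs are below) =====
def Claim_equal_remove_duplicate_headers : Prop := ∀ (text : String), Dom_remove_duplicate_headers text → Spec_remove_duplicate_headers text (remove_duplicate_headers text)

-- ===== LEMMAS AND PROOFS =====

theorem rdh_mem_goB_split : ∀ (k : Nat) (rest : List String), rest.length ≤ k →
    ∀ (n i : Int) (seen : Bool) (drop : PySem.Set Int) (x : Int),
    (x ∈ rdhGoB rest n i seen drop ↔ x ∈ drop ∨ x ∈ rdhGoB rest n i seen PySem.Set.empty) := by
  intro k
  induction k with
  | zero =>
    intro rest h n i seen drop x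
    interval_cases h' : rest.length
    · match rest, h' with
      | [], _ => simp [rdhGoB, PySem.Set.empty]
  | succ k ih =>
    intro rest h n i seen drop x
    match rest with
    | [] => simp [rdhGoB, PySem.Set.empty]
    | l :: rs =>
      rw [rdhGoB, rdhGoB]
      by_cases hl : PySem.Str.isIn "HOLD PICKUP LIST" l
      · simp only [hl, if_true]
        have hlen : (rs.drop 5).length ≤ k := by
          simp only [List.length_drop]; simp at h; omega
        rw [ih _ hlen, ih _ hlen (drop := if seen then PySem.Set.update PySem.Set.empty _ else _)]
        by_cases hs : seen
        · simp only [hs, if_true, PySem.Set.mem_update]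
          have : x ∈ PySem.Set.update (PySem.Set.empty (α := Int)) (PySem.List.pyRange i (min (i + 6) n) 1)
              ↔ x ∈ PySem.List.pyRange i (min (i + 6) n) 1 := by
            simp [PySem.Set.mem_update, PySem.Set.empty]
          tauto
        · simp [hs]
      · simp only [hl, Bool.false_eq_true, if_false]
        have hlen : rs.length ≤ k := by simp at h; omega
        rw [ih _ hlen]

theorem rdh_goB_lb : ∀ (k : Nat) (rest : List String), rest.length ≤ k →
    ∀ (n i : Int) (seen : Bool) (x : Int),
    x ∈ rdhGoB rest n i seen PySem.Set.empty → i ≤ x := by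
  intro k
  induction k with
  | zero =>
    intro rest h n i seen x
    match rest, h with
    | [], _ => simp [rdhGoB, PySem.Set.empty]
  | succ k ih =>
    intro rest h n i seen x hx
    match rest with
    | [] => simp [rdhGoB, PySem.Set.empty] at hx
    | l :: rs =>
      rw [rdhGoB] at hx
      by_cases hl : PySem.Str.isIn "HOLD PICKUP LIST" l
      · simp only [hl, if_true] at hx
        have hlen : (rs.drop 5).length ≤ k := by
          simp only [List.length_drop]; simp at h; omega
        rw [rdh_mem_goB_split k _ hlen] at hx
        rcases hx with hx | hx
        · by_cases hs : seen
          · simp only [hs, if_true, PySem.Set.mem_update, PySem.Set.empty] at hx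
            rcases hx with hx | hx
            · simp at hx
            · rw [PySem.List.mem_pyRange_one] at hx; omega
          · simp [hs, PySem.Set.empty] at hx
        · have := ih _ hlen _ _ _ _ hx; omega
      · simp only [hl, Bool.false_eq_true, if_false] at hx
        have hlen : rs.length ≤ k := by simp at h; omega
        have := ih _ hlen _ _ _ _ hx; omega

theorem rdh_contains_false {D : PySem.Set Int} {x : Int} (h : x ∉ D) :
    PySem.Set.contains D x = false := by
  cases hc : PySem.Set.contains D x
  · rfl
  · exact absurd ((PySem.Set.contains_iff _ _).mp hc) h

theorem rdh_contains_congr {D D' : PySem.Set Int} {x : Int} (h : x ∈ D ↔ x ∈ D') :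
    PySem.Set.contains D x = PySem.Set.contains D' x := by
  by_cases hx : x ∈ D
  · rw [(PySem.Set.contains_iff _ _).mpr hx, (PySem.Set.contains_iff _ _).mpr (h.mp hx)]
  · rw [rdh_contains_false hx, rdh_contains_false (fun hy => hx (h.mpr hy))]

theorem rdh_main : ∀ (k : Nat) (rest : List String), rest.length ≤ k →
    ∀ (n i : Int) (seen : Bool), (rest = [] ∨ n = i + rest.length) →
    rdhGoA rest seen =
      ((PySem.List.enumerate rest i).filter
        (fun p => !(PySem.Set.contains (rdhGoB rest n i seen PySem.Set.empty) p.1))).map (·.2) := by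
  intro k
  induction k with
  | zero =>
    intro rest h n i seen _
    match rest, h with
    | [], _ => simp [rdhGoA, rdhGoB, PySem.List.enumerate]
  | succ k ih =>
    intro rest h n i seen hn
    match rest with
    | [] => simp [rdhGoA, rdhGoB, PySem.List.enumerate]
    | l :: rs =>
      have hn' : n = i + 1 + rs.length := by
        rcases hn with hn | hn
        · exact absurd hn (by simp)
        · simp only [List.length_cons] at hn
          push_cast at hn ⊢
          omega
      rw [rdhGoA, rdhGoB]
      by_cases hl : PySem.Str.isIn "HOLD PICKUP LIST" l
      · simp only [hl, if_true]
        have hlen5 : (rs.drop 5).length ≤ k := by simp only [List.length_drop]; simp at h; omega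
        have hdecomp : l :: rs = (l :: rs.take 5) ++ rs.drop 5 := by
          simp [List.take_append_drop]
        by_cases hs : seen
        all_goals simp only [hs, if_true, Bool.false_eq_true, if_false]
        -- seen = true : whole header block dropped
        · rw [hdecomp, PySem.List.enumerate_append, List.filter_append, List.map_append]
          set R : PySem.Set Int := PySem.Set.update PySem.Set.empty (PySem.List.pyRange i (min (i + 6) n) 1) with hR
          set D := rdhGoB (rs.drop 5) n (i + 6) true R with hD
          have hmemR : ∀ x : Int, x ∈ R ↔ i ≤ x ∧ x < min (i + 6) n := by
            intro x
            simp [hR, PySem.Set.mem_update, PySem.Set.empty, PySem.List.mem_pyRange_one]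
          have hfirst : ((PySem.List.enumerate (l :: rs.take 5) i).filter
              (fun p => !(PySem.Set.contains D p.1))).map (·.2) = [] := by
            rw [List.map_eq_nil_iff, List.filter_eq_nil_iff]
            intro p hp
            rw [PySem.List.mem_enumerate_iff] at hp
            obtain ⟨m, hm, rfl⟩ := hp
            simp only [List.length_cons, List.length_take] at hm
            have hmemD : (i + m) ∈ D := by
              rw [hD, rdh_mem_goB_split k _ hlen5]
              left
              rw [hmemR]
              constructor
              · omega
              · have : (m : Int) < min 5 rs.length + 1 := by exact_mod_cast hm
                push_cast at this ⊢
                omega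
            simpa using hmemD
          rw [hfirst, List.nil_append]
          rcases hempty : rs.drop 5 with _ | ⟨d, ds⟩
          · rw [rdhGoA]
            simp [PySem.List.enumerate]
          · have hlenrs : 5 ≤ rs.length := by
              have := congrArg List.length hempty
              simp only [List.length_drop, List.length_cons] at this
              omega
            have hstart : i + ((l :: rs.take 5).length : Int) = i + 6 := by
              simp only [List.length_cons, List.length_take]
              have : min 5 rs.length = 5 := by omega
              rw [this]; ring
            rw [hstart]
            have hcong : ((PySem.List.enumerate (rs.drop 5) (i + 6)).filter
                  (fun p => !(PySem.Set.contains D p.1))) =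
                ((PySem.List.enumerate (rs.drop 5) (i + 6)).filter
                  (fun p => !(PySem.Set.contains (rdhGoB (rs.drop 5) n (i + 6) true PySem.Set.empty) p.1))) := by
              apply List.filter_congr
              intro p hp
              rw [PySem.List.mem_enumerate_iff] at hp
              obtain ⟨m, hm, rfl⟩ := hp
              have hiff : (i + 6 + (m : Int)) ∈ D ↔
                  (i + 6 + (m : Int)) ∈ rdhGoB (rs.drop 5) n (i + 6) true PySem.Set.empty := by
                rw [hD, rdh_mem_goB_split k _ hlen5, hmemR]
                constructor
                · rintro (⟨_, hlt⟩ | hx)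
                  · omega
                  · exact hx
                · intro hx; right; exact hx
              exact congrArg (fun b => !b) (rdh_contains_congr hiff)
            rw [← hempty] at *
            rw [hcong]
            exact ih _ hlen5 n (i + 6) true (by
              right
              simp only [List.length_drop]
              omega)
        -- seen = false : first header block kept
        · set D := rdhGoB (rs.drop 5) n (i + 6) true PySem.Set.empty with hD
          rw [hdecomp, PySem.List.enumerate_append, List.filter_append, List.map_append]
          have hfirst : ((PySem.List.enumerate (l :: rs.take 5) i).filter
              (fun p => !(PySem.Set.contains D p.1))).map (·.2) = l :: rs.take 5 := by
            have : (PySem.List.enumerate (l :: rs.take 5) i).filter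
                (fun p => !(PySem.Set.contains D p.1)) = PySem.List.enumerate (l :: rs.take 5) i := by
              apply List.filter_eq_self.mpr
              intro p hp
              rw [PySem.List.mem_enumerate_iff] at hp
              obtain ⟨m, hm, rfl⟩ := hp
              simp only [List.length_cons, List.length_take] at hm
              have hnot : (i + m) ∉ D := by
                intro hx
                have := rdh_goB_lb k _ hlen5 _ _ _ _ hx
                have : (m : Int) < min 5 rs.length + 1 := by exact_mod_cast hm
                omega
              simpa using hnot
            rw [this, PySem.List.map_snd_enumerate]
          rw [hfirst]
          congr 1
          rcases hempty : rs.drop 5 with _ | ⟨d, ds⟩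
          · rw [rdhGoA]
            simp [PySem.List.enumerate]
          · have hlenrs : 5 ≤ rs.length := by
              have := congrArg List.length hempty
              simp only [List.length_drop, List.length_cons] at this
              omega
            have hstart : i + ((l :: rs.take 5).length : Int) = i + 6 := by
              simp only [List.length_cons, List.length_take]
              have : min 5 rs.length = 5 := by omega
              rw [this]; ring
            rw [hstart, ← hempty] at *
            exact ih _ hlen5 n (i + 6) true (by
              right
              simp only [List.length_drop]
              omega)
      · simp only [hl, Bool.false_eq_true, if_false]
        have hlen : rs.length ≤ k := by simp at h; omega
        rw [PySem.List.enumerate_cons]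
        have hnot : i ∉ rdhGoB rs n (i + 1) seen PySem.Set.empty := by
          intro hx
          have := rdh_goB_lb k _ hlen _ _ _ _ hx
          omega
        rw [List.filter_cons]
        simp only [rdh_contains_false hnot, Bool.not_false, if_true, List.map_cons]
        congr 1
        exact ih _ hlen n (i + 1) seen (by
          rcases rs with _ | _
          · left; rfl
          · right; omega)

-- ===== VERDICT (by name: the statement is the Claim_ definition above) =====
theorem remove_duplicate_headers_spec : Claim_equal_remove_duplicate_headers := by
  intro text _
  show remove_duplicate_headers text = remove_duplicate_headers_alt text
  rw [remove_duplicate_headers, remove_duplicate_headers_alt]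
  have h0 : rdhLines text = [] ∨
      ((rdhLines text).length : Int) = ((0 : Nat) : Int) + ((rdhLines text).length : Int) :=
    Or.inr (by push_cast; ring)
  exact congrArg (PySem.Str.join "\n")
    (rdh_main (rdhLines text).length (rdhLines text) (le_refl _)
      ((rdhLines text).length : Int) 0 false h0)
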